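-- pv_equiv track=rewrite | github.com/huyendt42/ai_trailer_generator | src/plot_igdb.py | pick_best_game
-- ===== SOURCE A (Python) =====
-- def pick_best_game(results: list, target_name: str) -> dict | None:
--     """
--     Heuristic pick:
--     1) Exact match (case-insensitive) on name
--     2) Startswith match
--     3) Otherwise first result
--     """
--     if not results:
--         return None
--
--     t = target_name.strip().lower()
--
--     exact = [g for g in results if (g.get("name") or "").strip().lower() == t]
--     if exact:
--         return exact[0]
--
--     starts = [g for g in results if (g.get("name") or "").strip().lower().startswith(t)]
--     if starts:
--         return starts[0]
--
--     return results[0]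
-- ===== SOURCE B (Python) =====
-- def pick_best_game(results: list, target_name: str) -> dict | None:
--     """
--     Single pass: return the first exact (case-insensitive) name match
--     immediately; remember the first startswith match seen; otherwise
--     fall back to the first result.
--     """
--     if not results:
--         return None
--
--     t = target_name.strip().lower()
--
--     starts_candidate = None
--     for g in results:
--         name = (g.get("name") or "").strip().lower()
--         if name == t:
--             return g
--         if starts_candidate is None and name.startswith(t):
--             starts_candidate = g
--
--     if starts_candidate is not None:
--         return starts_candidate
--     return results[0]
-- ===== Notes on version B (the rewrite author's own statement) =====
-- stated objective: alternative
-- what changed: Replaced A's two full filter passes (exact list, then startswith list) by a single loop that normalizes each name once, returns the first exact match immediately and remembers the first startswith candidate for the fallback.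
import Mathlib
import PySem

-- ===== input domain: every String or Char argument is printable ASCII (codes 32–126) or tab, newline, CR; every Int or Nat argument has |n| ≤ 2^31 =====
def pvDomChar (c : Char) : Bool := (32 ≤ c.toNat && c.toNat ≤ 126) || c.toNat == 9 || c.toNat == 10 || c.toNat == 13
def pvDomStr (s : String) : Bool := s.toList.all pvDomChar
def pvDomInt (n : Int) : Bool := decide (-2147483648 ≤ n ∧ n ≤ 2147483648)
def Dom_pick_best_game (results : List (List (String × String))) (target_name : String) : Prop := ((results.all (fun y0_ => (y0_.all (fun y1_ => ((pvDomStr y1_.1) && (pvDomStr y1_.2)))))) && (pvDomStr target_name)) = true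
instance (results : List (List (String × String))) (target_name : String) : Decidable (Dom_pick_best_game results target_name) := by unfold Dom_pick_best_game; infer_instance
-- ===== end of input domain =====

-- B replaces A's two filter passes by one loop with an early exact return and a
-- remembered first startswith candidate (alternative decomposition, same cost class).

-- shared normalization: (g.get("name") or "").strip().lower() — dict.get = first match;
-- `or ""` maps both a missing key (None) and "" to "", so getD "" is exact
def pvNormName (g : List (String × String)) : String :=
  PySem.Str.lower (PySem.Str.strip ((g.lookup "name").getD ""))

-- ===== PORT A =====
def pick_best_game (results : List (List (String × String))) (target_name : String) : Option (List (String × String)) :=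
  match results with
  | [] => none
  | _ :: _ =>
    let t := PySem.Str.lower (PySem.Str.strip target_name)
    let exact := results.filter (fun g => pvNormName g = t)
    match exact with
    | e :: _ => some e          -- return exact[0]
    | [] =>
      let starts := results.filter (fun g => PySem.Str.startswith (pvNormName g) t)
      match starts with
      | s :: _ => some s        -- return starts[0]
      | [] => results.head?     -- return results[0] (nonempty here)

-- ===== PORT B =====
-- the for-loop: early return on exact match, remember first startswith candidate
def pick_best_game_loop (t : String) : List (List (String × String)) → Option (List (String × String)) → Option (List (String × String))
  | [], cand => cand
  | g :: rest, cand =>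
    let name := pvNormName g
    if name = t then some g
    else pick_best_game_loop t rest
      (if cand = none ∧ PySem.Str.startswith name t then some g else cand)

def pick_best_game_alt (results : List (List (String × String))) (target_name : String) : Option (List (String × String)) :=
  match results with
  | [] => none
  | first :: _ =>
    let t := PySem.Str.lower (PySem.Str.strip target_name)
    match pick_best_game_loop t results none with
    | some g => some g
    | none => some first        -- fall back to results[0]

-- ===== PRECONDITION & SPEC =====
def Spec_pick_best_game (results : List (List (String × String))) (target_name : String) (out : Option (List (String × String))) : Prop := out = pick_best_game_alt results target_name
instance (results : List (List (String × String))) (target_name : String) (out : Option (List (String × String))) : Decidable (Spec_pick_best_game results target_name out) := by unfold Spec_pick_best_game; infer_instance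

-- ===== CLAIM (what is proved, stated in full; the proofs are below) =====
def Claim_equal_pick_best_game : Prop := ∀ (results : List (List (String × String))) (target_name : String), Dom_pick_best_game results target_name → Spec_pick_best_game results target_name (pick_best_game results target_name)

-- ===== LEMMAS AND PROOFS =====

-- loop characterisation: first exact match, else the recorded candidate, else first startswith match
theorem pick_best_game_loop_eq (t : String) (xs : List (List (String × String)))
    (cand : Option (List (String × String))) :
    pick_best_game_loop t xs cand =
      ((xs.filter (fun g => pvNormName g = t)).head?).or
        (cand.or ((xs.filter (fun g => PySem.Str.startswith (pvNormName g) t)).head?)) := by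
  induction xs generalizing cand with
  | nil => simp [pick_best_game_loop]
  | cons g rest ih =>
    by_cases hx : pvNormName g = t
    · simp [pick_best_game_loop, hx]
    · by_cases hc : cand = none
      · by_cases hs : PySem.Str.startswith (pvNormName g) t = true
        all_goals
          simp only [PySem.Str.startswith_eq] at hs
          simp [pick_best_game_loop, hx, hc, hs, ih]
      · obtain ⟨c, rfl⟩ : ∃ c, cand = some c := by
          cases cand with
          | none => exact absurd rfl hc
          | some c => exact ⟨c, rfl⟩
        simp [pick_best_game_loop, hx, ih]

-- ===== VERDICT (by name: the statement is the Claim_ definition above) =====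
theorem pick_best_game_spec : Claim_equal_pick_best_game := by
  intro results target_name _
  unfold Spec_pick_best_game
  cases results with
  | nil => rfl
  | cons first rest =>
    unfold pick_best_game pick_best_game_alt
    simp only [List.head?] at *
    rw [pick_best_game_loop_eq]
    generalize PySem.Str.lower (PySem.Str.strip target_name) = t
    cases he : List.filter (fun g => decide (pvNormName g = t)) (first :: rest) with
    | cons e l => simp
    | nil =>
      cases hs : List.filter (fun g => PySem.Str.startswith (pvNormName g) t) (first :: rest) with
      | cons s l => simp
      | nil => simp
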